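-- pv_equiv track=rewrite | github.com/Psychim/num_enhanced_translation | evaluation/number_detector/utils.py | number_to_str_10000
-- ===== SOURCE A (Python) =====
-- num_dict = { 0: "零", 1: "一", 2: "二", 3: "三", 4: "四",
--              5: "五", 6: "六", 7: "七", 8: "八", 9: "九" }
--
-- unit_map = [ ["", "十", "百", "千"],       ["万", "十万", "百万", "千万"],
--              ["亿", "十亿", "百亿", "千亿"], ["兆", "十兆", "百兆", "千兆"] ]
--
-- def number_to_str_10000(data_str):
--     """一万以内的数转成大写"""
--     res = []
--     count = 0
--     # 倒转
--     str_rev = reversed(data_str)  # seq -- 要转换的序列，可以是 tuple, string, list 或 range。返回一个反转的迭代器。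
--     for i in str_rev:
--         if i is not "0":
--             count_cos = count // 4  # 行
--             count_col = count % 4   # 列
--             res.append(unit_map[count_cos][count_col])
--             res.append(num_dict[int(i)])
--             count += 1
--         else:
--             count += 1
--             if not res:
--                 res.append("零")
--             elif res[-1] is not "零":
--                 res.append("零")
--     # 再次倒序，这次变为正序了
--     res.reverse()
--     # 去掉"一十零"这样整数的“零”
--     if res[-1] is "零" and len(res) is not 1:
--         res.pop()
--
--     return "".join(res)
-- ===== SOURCE B (Python) =====
-- num_dict = { 0: "零", 1: "一", 2: "二", 3: "三", 4: "四",
--              5: "五", 6: "六", 7: "七", 8: "八", 9: "九" }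
--
-- unit_map = [ ["", "十", "百", "千"],       ["万", "十万", "百万", "千万"],
--              ["亿", "十亿", "百亿", "千亿"], ["兆", "十兆", "百兆", "千兆"] ]
--
-- def number_to_str_10000(data_str):
--     """一万以内的数转成大写"""
--     n = len(data_str)
--     parts = []
--     pending_zero = False
--     for i, ch in enumerate(data_str):
--         d = int(ch)
--         if d != 0:
--             if pending_zero:
--                 parts.append("零")
--                 pending_zero = False
--             place = n - 1 - i
--             parts.append(num_dict[d])
--             parts.append(unit_map[place // 4][place % 4])
--         else:
--             pending_zero = True
--     if not parts:
--         return "零"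
--     return "".join(parts)
-- ===== Notes on version B (the rewrite author's own statement) =====
-- stated objective: simpler
-- what changed: B replaces A's reverse-the-string / append-in-reverse / reverse-again / pop-trailing-零 pipeline by a single forward pass that keeps a pending-zero flag and computes each place value from the index, so no reversal and no final trim are needed.
import Mathlib
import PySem

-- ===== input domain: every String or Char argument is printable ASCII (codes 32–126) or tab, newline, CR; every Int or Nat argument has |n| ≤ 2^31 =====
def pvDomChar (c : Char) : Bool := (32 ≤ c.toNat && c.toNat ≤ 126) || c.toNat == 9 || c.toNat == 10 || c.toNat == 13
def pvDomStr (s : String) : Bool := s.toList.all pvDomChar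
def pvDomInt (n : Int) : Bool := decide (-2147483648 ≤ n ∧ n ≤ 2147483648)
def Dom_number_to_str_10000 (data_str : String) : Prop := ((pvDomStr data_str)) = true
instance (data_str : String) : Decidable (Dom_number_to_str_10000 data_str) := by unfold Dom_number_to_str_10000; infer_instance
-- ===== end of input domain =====

-- B replaces A's reverse-iterate / reverse-again / trim-trailing-零 pipeline by a single
-- forward pass with a pending-zero flag, so nothing is reversed and no final pop is needed
-- (objective: simpler; same cost).

-- shared numeral tables (module-level constants num_dict / unit_map of the Python source)
def numDict : List String := ["零", "一", "二", "三", "四", "五", "六", "七", "八", "九"]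
def unitMap : List (List String) :=
  [["", "十", "百", "千"], ["万", "十万", "百万", "千万"],
   ["亿", "十亿", "百亿", "千亿"], ["兆", "十兆", "百兆", "千兆"]]

-- ===== PORT A =====
-- one step of A's loop over the reversed string; state = (res, count).
-- num_dict[int(i)] is ported as numDict.getD (i.toNat - 48) "" — exact for digit chars
-- (a non-digit raises ValueError in Python; excluded by Pre_); unit_map[count//4][count%4]
-- is ported with getD: exact while the lookup is in range (count ≥ 16 at a nonzero digit
-- raises IndexError in Python; excluded by Pre_); count stays ≥ 0, so Nat / and % are
-- Python's // and %.
def stepA (st : List String × Nat) (i : Char) : List String × Nat :=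
  match st with
  | (res, count) =>
    if i ≠ '0' then
      let count_cos := count / 4
      let count_col := count % 4
      (res ++ [(unitMap.getD count_cos []).getD count_col ""]
           ++ [numDict.getD (i.toNat - 48) ""], count + 1)
    else
      if res = [] then (res ++ ["零"], count + 1)
      else if res.getLast? ≠ some "零" then (res ++ ["零"], count + 1)
      else (res, count + 1)

-- Python's `x is "..."` checks are ported as string equality: every element compared is a
-- literal or table entry for which CPython identity and equality coincide here.
def number_to_str_10000 (data_str : String) : String :=
  let str_rev := data_str.toList.reverse
  let st := str_rev.foldl stepA ([], 0)
  let res := st.1.reverse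
  let res := if res.getLast? = some "零" ∧ res.length ≠ 1 then res.dropLast else res
  String.join res

-- ===== PORT B =====
-- one step of B's forward loop; n = len(data_str), state = (parts, pending_zero).
-- int(ch) is ported as ch.toNat - 48 (exact for digit chars; non-digits raise in Python,
-- excluded by Pre_); place = n-1-i is ≥ 0 for every enumerate index, so .toNat is exact,
-- and the unit_map lookup is ported with getD as in A's port.
def stepB (n : Nat) (st : List String × Bool) (p : Int × Char) : List String × Bool :=
  match st, p with
  | (parts, pending), (i, ch) =>
    let d := ch.toNat - 48
    if d ≠ 0 then
      let parts := if pending then parts ++ ["零"] else parts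
      let place := ((n : Int) - 1 - i).toNat
      (parts ++ [numDict.getD d ""]
             ++ [(unitMap.getD (place / 4) []).getD (place % 4) ""], false)
    else (parts, true)

def number_to_str_10000_alt (data_str : String) : String :=
  let cs := data_str.toList
  let n := cs.length
  let st := (PySem.List.enumerate cs).foldl (stepB n) ([], false)
  if st.1 = [] then "零" else String.join st.1

-- ===== PRECONDITION & SPEC =====
-- Exactly the inputs on which Python A returns: a nonempty string of ASCII digits
-- ('' hits res[-1] → IndexError, a non-digit hits int(i) → ValueError) whose nonzero
-- digits all sit in the last 16 positions (a nonzero digit further left makes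
-- unit_map[count//4] an out-of-range lookup → IndexError).
def Pre_number_to_str_10000 (data_str : String) : Prop :=
  data_str.toList ≠ [] ∧
  data_str.toList.all (fun c => 48 ≤ c.toNat && c.toNat ≤ 57) = true ∧
  (data_str.toList.take (data_str.toList.length - 16)).all (fun c => c == '0') = true
instance (data_str : String) : Decidable (Pre_number_to_str_10000 data_str) := by
  unfold Pre_number_to_str_10000; infer_instance

def pvWitness_number_to_str_10000 : String := "0"

def Spec_number_to_str_10000 (data_str : String) (out : String) : Prop :=
  out = number_to_str_10000_alt data_str
instance (data_str : String) (out : String) : Decidable (Spec_number_to_str_10000 data_str out) := by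
  unfold Spec_number_to_str_10000; infer_instance

-- ===== CLAIM (what is proved, stated in full; the proofs are below) =====
def Claim_equal_number_to_str_10000 : Prop := ∀ (data_str : String), Dom_number_to_str_10000 data_str → Pre_number_to_str_10000 data_str → Spec_number_to_str_10000 data_str (number_to_str_10000 data_str)

-- ===== LEMMAS AND PROOFS =====

-- the digit / unit strings both ports look up
def dig (c : Char) : String := numDict.getD (c.toNat - 48) ""
def unitS (k : Nat) : String := (unitMap.getD (k / 4) []).getD (k % 4) ""

lemma toNat_eq_48 {c : Char} (h : c.toNat = 48) : c = '0' := by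
  have := Char.ofNat_toNat c; rw [h] at this; exact this.symm

lemma dig_ne_ling {c : Char} (h0 : c ≠ '0') (h1 : 48 ≤ c.toNat) (h2 : c.toNat ≤ 57) :
    dig c ≠ "零" := by
  have h48 : c.toNat ≠ 48 := fun h => h0 (toNat_eq_48 h)
  unfold dig
  have : c.toNat - 48 = 1 ∨ c.toNat - 48 = 2 ∨ c.toNat - 48 = 3 ∨ c.toNat - 48 = 4 ∨
      c.toNat - 48 = 5 ∨ c.toNat - 48 = 6 ∨ c.toNat - 48 = 7 ∨ c.toNat - 48 = 8 ∨
      c.toNat - 48 = 9 := by omega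
  rcases this with h|h|h|h|h|h|h|h|h <;> rw [h] <;> decide

-- A's loop, with the list-valued state collapsed to the flag it is equivalent to:
-- fA l k z = the elements A appends while consuming l, when count = k and z says
-- "a 零 would be appended on a zero" (res empty, or res does not end in 零).
def fA : List Char → Nat → Bool → List String
  | [], _, _ => []
  | c :: r, k, z =>
    if c ≠ '0' then unitS k :: dig c :: fA r (k + 1) true
    else (if z then ["零"] else []) ++ fA r (k + 1) false

def zAfter : List Char → Bool → Bool
  | [], z => z
  | c :: r, _ => zAfter r (decide (c ≠ '0'))

lemma foldA_eq (l : List Char) (res : List String) (k : Nat)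
    (hd : ∀ c ∈ l, 48 ≤ c.toNat ∧ c.toNat ≤ 57) :
    (List.foldl stepA (res, k) l).1
      = res ++ fA l k (res.isEmpty || decide (res.getLast? ≠ some "零")) := by
  induction l generalizing res k with
  | nil => simp [fA]
  | cons c r ih =>
    have hc := hd c (List.mem_cons_self)
    have hr : ∀ x ∈ r, 48 ≤ x.toNat ∧ x.toNat ≤ 57 := fun x hx => hd x (List.mem_cons_of_mem _ hx)
    simp only [List.foldl_cons]
    by_cases h0 : c = '0'
    · subst h0
      simp only [fA, stepA, ne_eq, not_true_eq_false, if_false, ite_not]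
      by_cases he : res = []
      · subst he
        rw [if_pos rfl]
        rw [ih _ _ hr]
        simp [List.getLast?_concat]
      · rw [if_neg he]
        by_cases hl : res.getLast? = some "零"
        · rw [if_pos hl]
          rw [ih _ _ hr]
          simp only [hl, ne_eq, not_true_eq_false, decide_false, Bool.or_false]
          rw [show res.isEmpty = false from by simp [he]]
          simp
        · rw [if_neg hl]
          rw [ih _ _ hr]
          simp only [List.getLast?_concat]
          rw [show (res ++ ["零"]).isEmpty = false from by simp]
          simp [hl]
    · simp only [fA, stepA, ne_eq, h0, not_false_eq_true, if_true, if_pos]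
      rw [ih _ _ hr]
      have hdig : dig c ≠ "零" := dig_ne_ling h0 hc.1 hc.2
      simp only [List.append_assoc, List.cons_append, List.nil_append]
      congr 1
      simp [dig] at hdig
      simp [List.getLast?_concat, unitS, dig, hdig]

lemma zAfter_eq (l : List Char) (z : Bool) :
    zAfter l z = match l.getLast? with
                 | none => z
                 | some c => decide (c ≠ '0') := by
  induction l generalizing z with
  | nil => simp [zAfter]
  | cons c r ih =>
    cases r with
    | nil => simp [zAfter]
    | cons c' r' =>
      rw [zAfter, ih]
      cases hg : (c' :: r').getLast? with
      | none => simp [List.getLast?_eq_none_iff] at hg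
      | some d => simp [hg]

lemma fA_concat (l : List Char) (c : Char) (k : Nat) (z : Bool) :
    fA (l ++ [c]) k z = fA l k z ++ fA [c] (k + l.length) (zAfter l z) := by
  induction l generalizing k z with
  | nil => simp [fA, zAfter]; rfl
  | cons a r ih =>
    by_cases h : a = '0'
    · subst h
      simp only [List.cons_append, fA, ne_eq, not_true_eq_false, if_false, zAfter]
      rw [ih]
      rw [show k + 1 + r.length = k + (r.length + 1) from by omega]
      simp [fA, List.append_assoc]
    · simp only [List.cons_append, fA, ne_eq, h, not_false_eq_true, if_true, zAfter]
      rw [ih]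
      rw [show k + 1 + r.length = k + (r.length + 1) from by omega]
      simp [fA, List.append_assoc]

-- A's appended elements, read forward (after the res.reverse): at each position the
-- place value is the length of the remaining suffix, and a zero digit emits 零 exactly
-- when the next character is not another zero.
def Rv : List Char → List String
  | [] => []
  | c :: rest =>
    (if c ≠ '0' then [dig c, unitS rest.length]
     else if rest.head? = some '0' then [] else ["零"]) ++ Rv rest

lemma Rv_eq (cs : List Char) : (fA cs.reverse 0 true).reverse = Rv cs := by
  induction cs with
  | nil => simp [fA, Rv]
  | cons c rest ih =>
    rw [Rv]
    rw [show (c :: rest).reverse = rest.reverse ++ [c] from by simp]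
    rw [fA_concat]
    rw [List.reverse_append, ih]
    rw [zAfter_eq]
    have hlast : rest.reverse.getLast? = rest.head? := by simp [List.getLast?_reverse]
    by_cases h : c = '0'
    · subst h
      simp only [fA, ne_eq, not_true_eq_false, if_false, List.append_nil]
      cases hh : rest.head? with
      | none =>
        rw [hlast, hh]
        simp [hh]
      | some c' =>
        rw [hlast, hh]
        by_cases h' : c' = '0'
        · subst h'; simp [hh]
        · simp [hh, h']
    · simp only [fA, ne_eq, h, not_false_eq_true, if_true, List.append_nil]
      simp

-- B's loop with the accumulator removed
def gB : List Char → Bool → List String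
  | [], _ => []
  | c :: rest, pend =>
    if c.toNat - 48 ≠ 0 then
      (if pend then ["零"] else []) ++ [dig c, unitS rest.length] ++ gB rest false
    else gB rest true

lemma foldB_eq (n : Nat) (cs : List Char) (k : Nat) (parts : List String) (pend : Bool)
    (hn : k + cs.length = n) :
    (List.foldl (stepB n) (parts, pend) (PySem.List.enumerate cs (k : Int))).1
      = parts ++ gB cs pend := by
  induction cs generalizing k parts pend with
  | nil => simp [PySem.List.enumerate, gB]
  | cons c rest ih =>
    rw [PySem.List.enumerate_cons]
    simp only [List.foldl_cons, gB]
    have hplace : (((n : Nat) : Int) - 1 - (k : Int)).toNat = rest.length := by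
      simp at hn; omega
    by_cases hc : c.toNat - 48 = 0
    · simp only [stepB, hc, ne_eq, not_true_eq_false, if_false]
      have := ih (k + 1) parts true (by simp at hn ⊢; omega)
      rw [show ((k : Int) + 1) = ((k + 1 : Nat) : Int) from by push_cast; ring]
      exact this
    · simp only [stepB, ne_eq, hc, not_false_eq_true, if_true]
      rw [hplace]
      rw [show ((k : Int) + 1) = ((k + 1 : Nat) : Int) from by push_cast; ring]
      rw [ih (k + 1) _ false (by simp at hn ⊢; omega)]
      cases pend <;> simp [dig, unitS, List.append_assoc]

-- whether, after consuming the list, the last consumed character was a zero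
def endZ : List Char → Bool → Bool
  | [], p => p
  | c :: r, _ => endZ r (decide (c = '0'))

lemma endZ_eq (l : List Char) (p : Bool) :
    endZ l p = match l.getLast? with
               | none => p
               | some c => decide (c = '0') := by
  induction l generalizing p with
  | nil => simp [endZ]
  | cons c r ih =>
    cases r with
    | nil => simp [endZ]
    | cons c' r' =>
      rw [endZ, ih]
      cases hg : (c' :: r').getLast? with
      | none => simp [List.getLast?_eq_none_iff] at hg
      | some d => simp [hg]

lemma toNat48_iff {c : Char} (h1 : 48 ≤ c.toNat) (h2 : c.toNat ≤ 57) :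
    c.toNat - 48 = 0 ↔ c = '0' := by
  constructor
  · intro h; exact toNat_eq_48 (by omega)
  · intro h; subst h; decide

-- the heart: A's forward-read output = B's output, plus one trailing 零 exactly when
-- the string ends in a zero run (the 零 A later pops)
lemma Rv_eq_gB (cs : List Char) (pend : Bool)
    (hd : ∀ c ∈ cs, 48 ≤ c.toNat ∧ c.toNat ≤ 57) :
    (if pend ∧ cs.head? ≠ some '0' then ["零"] else []) ++ Rv cs
      = gB cs pend ++ (if endZ cs pend then ["零"] else []) := by
  induction cs generalizing pend with
  | nil => cases pend <;> simp [Rv, gB, endZ]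
  | cons c rest ih =>
    have hc := hd c (List.mem_cons_self)
    have hr : ∀ x ∈ rest, 48 ≤ x.toNat ∧ x.toNat ≤ 57 :=
      fun x hx => hd x (List.mem_cons_of_mem _ hx)
    by_cases h0 : c = '0'
    · subst h0
      have key := ih true hr
      by_cases hh : rest.head? = some '0'
      · simpa [Rv, gB, endZ, hh] using key
      · simpa [Rv, gB, endZ, hh] using key
    · have hcz : ¬ (c.toNat - 48 = 0) := fun h => h0 ((toNat48_iff hc.1 hc.2).mp h)
      have key := ih false hr
      cases pend
      · simpa [Rv, gB, endZ, h0, hcz, List.append_assoc] using key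
      · simpa [Rv, gB, endZ, h0, hcz, List.append_assoc] using key

lemma gB_getLast (cs : List Char) (pend : Bool) (c : Char)
    (h : cs.getLast? = some c) (hc : c.toNat - 48 ≠ 0) :
    (gB cs pend).getLast? = some (unitS 0) := by
  induction cs generalizing pend with
  | nil => simp at h
  | cons a rest ih =>
    cases rest with
    | nil =>
      simp at h
      subst h
      rw [gB, if_pos (by simpa using hc)]
      simp [gB]
    | cons b rest' =>
      have h' : (b :: rest').getLast? = some c := by
        rw [List.getLast?_cons_cons] at h; exact h
      have hne : gB (b :: rest') false ≠ [] := by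
        intro hnil
        have := ih false h'
        rw [hnil] at this; simp at this
      rw [gB]
      by_cases ha : a.toNat - 48 = 0
      · rw [if_neg (by simpa using ha)]
        exact ih true h'
      · rw [if_pos (by simpa using ha)]
        rw [List.append_assoc, List.getLast?_append]
        rw [List.getLast?_append]
        rw [ih false h']
        rfl

theorem final (s : String)
    (h1 : s.toList ≠ [])
    (h2 : ∀ c ∈ s.toList, 48 ≤ c.toNat ∧ c.toNat ≤ 57) :
    number_to_str_10000 s = number_to_str_10000_alt s := by
  have hrev : ∀ c ∈ s.toList.reverse, 48 ≤ c.toNat ∧ c.toNat ≤ 57 := by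
    intro c hcm; exact h2 c (List.mem_reverse.mp hcm)
  have hA : (List.foldl stepA ([], 0) s.toList.reverse).1 = fA s.toList.reverse 0 true := by
    rw [foldA_eq _ _ _ hrev]; rfl
  have hB : (List.foldl (stepB s.toList.length) ([], false) (PySem.List.enumerate s.toList)).1
      = gB s.toList false := by
    have := foldB_eq s.toList.length s.toList 0 [] false (by simp)
    simpa using this
  have key := Rv_eq_gB s.toList false h2
  rw [show (if false = true ∧ s.toList.head? ≠ some '0' then ["零"] else []) = []
      from by simp, List.nil_append] at key
  -- unfold both sides
  rw [number_to_str_10000, number_to_str_10000_alt]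
  rw [hA, hB, Rv_eq, key]
  by_cases hz : endZ s.toList false = true
  · rw [if_pos hz]
    by_cases hg : gB s.toList false = []
    · rw [hg]
      simp
      decide
    · rw [if_neg hg]
      rw [if_pos ⟨by simp [List.getLast?_concat], by simp [hg, List.length_append]⟩]
      rw [List.dropLast_concat]
  · rw [if_neg hz, if_neg]
    · rw [List.append_nil]
      rw [if_neg]
      intro hnil
      have hlast : (gB s.toList false).getLast? = some (unitS 0) := by
        cases hlt : s.toList.getLast? with
        | none => exact absurd (List.getLast?_eq_none_iff.mp hlt) h1
        | some d =>
          apply gB_getLast _ _ d hlt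
          have hdm := h2 d (List.mem_of_getLast? hlt)
          have : d ≠ '0' := by
            intro hdz
            rw [endZ_eq, hlt] at hz
            simp [hdz] at hz
          exact fun hh => this ((toNat48_iff hdm.1 hdm.2).mp hh)
      rw [hnil] at hlast; simp at hlast
    · rw [List.append_nil]
      intro hcond
      have hlast : (gB s.toList false).getLast? = some (unitS 0) := by
        cases hlt : s.toList.getLast? with
        | none => exact absurd (List.getLast?_eq_none_iff.mp hlt) h1
        | some d =>
          apply gB_getLast _ _ d hlt
          have hdm := h2 d (List.mem_of_getLast? hlt)
          have : d ≠ '0' := by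
            intro hdz
            rw [endZ_eq, hlt] at hz
            simp [hdz] at hz
          exact fun hh => this ((toNat48_iff hdm.1 hdm.2).mp hh)
      rw [hcond.1] at hlast
      have : ("零" : String) = unitS 0 := by injection hlast
      exact absurd this.symm (by decide)

-- ===== VERDICT (by name: the statement is the Claim_ definition above) =====
theorem number_to_str_10000_spec : Claim_equal_number_to_str_10000 := by
  intro s _ hpre
  unfold Spec_number_to_str_10000
  refine final s hpre.1 ?_
  intro c hcm
  have := List.all_eq_true.mp hpre.2.1 c hcm
  simpa using this
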